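-- pv_equiv track=rewrite | github.com/tomasrsgomes/JogoMNK | jogomnk.py | obtem_coluna
-- ===== SOURCE A (Python) =====
-- def obtem_dimensao(tab):
--     '''
--     Obtem a dimensão de um tabuleiro --> (m,n)
--
--     Recebe um tabuleiro e devolve um tuplo formado pelo número de linhas (m) \
--         e colunas (n) do tabuleiro.
--     obtem_dimensao: tabuleiro --> tuplo
--     '''
--
--     return (len(tab),len(tab[0]))
--
-- def obtem_coluna(tab, pos):
--     '''
--     Obtem as posições da coluna de uma posição
--
--     Recebe um tabuleiro e uma posição do tabuleiro, e devolve um tuplo com \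
--         todas as posições que formam a coluna em que está contida a posição, \
--         ordenadas de menor a maior.
--     obtem_coluna: tabuleiro X posicao --> tuplo
--     '''
--
--     m,n = obtem_coordenadas(tab, pos)
--     l,c = obtem_dimensao(tab)
--
--     coluna = ()
--     for linha in range(1, l+1):
--         pos_linha = (linha-1)*c + n
--         coluna += (pos_linha,)
--
--     return coluna
--
-- def obtem_coordenadas(tab,pos):
--     '''
--     Obtem as coordenadas de uma posicao de um tabuleiro --> (l,c)
--
--     Recebe um tabuleiro e uma posição e devolve um tuplo com as cordenadas \
--         (linha,coluna) dessa posição.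
--     obtem_coordenadas: tabuleiro X posicao --> tuplo
--     '''
--
--     m,n = obtem_dimensao(tab)
--
--     linha = 1
--     while linha*n < pos:
--         linha += 1
--
--     posicao = (linha - 1) * n + 1
--     coluna = 1
--     while posicao != pos:
--         coluna += 1
--         posicao +=1
--
--     return (linha,coluna)
-- ===== SOURCE B (Python) =====
-- def obtem_coluna(tab, pos):
--     l, c = len(tab), len(tab[0])
--     col = (pos - 1) % c + 1
--     return tuple(range(col, l * c + col, c))
-- ===== Notes on version B (the rewrite author's own statement) =====
-- stated objective: simpler
-- what changed: Replaces the two counting while-loops (finding the row by repeated increments and the column by counting position-by-position up to pos) and the tuple-concatenation loop with a closed-form column index ((pos-1) % c + 1) and a single stepped range() materialised once.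
import Mathlib
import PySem

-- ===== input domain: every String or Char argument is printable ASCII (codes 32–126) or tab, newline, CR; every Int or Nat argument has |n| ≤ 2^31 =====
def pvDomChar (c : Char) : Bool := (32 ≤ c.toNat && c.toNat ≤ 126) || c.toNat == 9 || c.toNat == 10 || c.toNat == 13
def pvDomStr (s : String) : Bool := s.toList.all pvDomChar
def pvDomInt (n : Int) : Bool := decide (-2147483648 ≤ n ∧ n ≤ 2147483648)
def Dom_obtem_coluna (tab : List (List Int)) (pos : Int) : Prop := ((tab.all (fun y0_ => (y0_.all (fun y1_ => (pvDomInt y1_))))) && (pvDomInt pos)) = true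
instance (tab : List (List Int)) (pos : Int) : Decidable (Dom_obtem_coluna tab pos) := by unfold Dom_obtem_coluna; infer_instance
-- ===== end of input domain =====

-- B replaces A's two counting while-loops and tuple-concatenation loop by a closed-form
-- column index and one stepped range (objective: simpler).

-- ===== PORT A =====
-- len(tab[0]) raises IndexError on empty tab; Pre_ excludes tab = [], so headD [] is exact there.
def pvObtemDimensao (tab : List (List Int)) : Int × Int :=
  ((tab.length : Int), ((tab.headD []).length : Int))

-- 'while linha*n < pos: linha += 1'; fuel pos.toNat suffices on Pre_ (n ≥ 1, pos ≥ 1)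
def pvWhileLinha (n pos : Int) : Int → Nat → Int
  | linha, 0 => linha
  | linha, f+1 => if linha * n < pos then pvWhileLinha n pos (linha + 1) f else linha

-- 'while posicao != pos: coluna += 1; posicao += 1'; fuel (pos - posicao).toNat is exact on Pre_
def pvWhileCol (pos : Int) : Int → Int → Nat → Int
  | _, coluna, 0 => coluna
  | posicao, coluna, f+1 =>
      if posicao ≠ pos then pvWhileCol pos (posicao + 1) (coluna + 1) f else coluna

def pvObtemCoordenadas (tab : List (List Int)) (pos : Int) : Int × Int :=
  let n := (pvObtemDimensao tab).2
  let linha := pvWhileLinha n pos 1 pos.toNat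
  let posicao := (linha - 1) * n + 1
  let coluna := pvWhileCol pos posicao 1 (pos - posicao).toNat
  (linha, coluna)

def obtem_coluna (tab : List (List Int)) (pos : Int) : List Int :=
  let n := (pvObtemCoordenadas tab pos).2
  let l := (pvObtemDimensao tab).1
  let c := (pvObtemDimensao tab).2
  (PySem.List.pyRange 1 (l + 1) 1).foldl (fun coluna linha => coluna ++ [(linha - 1) * c + n]) []

-- ===== PORT B =====
def obtem_coluna_alt (tab : List (List Int)) (pos : Int) : List Int :=
  let l : Int := tab.length
  let c : Int := (tab.headD []).length
  let col := PySem.Int.mod (pos - 1) c + 1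
  PySem.List.pyRange col (l * c + col) c

-- ===== PRECONDITION & SPEC =====
-- Pre_ excludes exactly the inputs where A does not return: tab = [] (IndexError in len(tab[0])),
-- an empty first row (the row-finding while-loop never terminates), and pos < 1 (the
-- column-counting while-loop never terminates).
def Pre_obtem_coluna (tab : List (List Int)) (pos : Int) : Prop :=
  tab ≠ [] ∧ (tab.headD []) ≠ [] ∧ 1 ≤ pos
instance (tab : List (List Int)) (pos : Int) : Decidable (Pre_obtem_coluna tab pos) := by
  unfold Pre_obtem_coluna; infer_instance

def pvWitness_obtem_coluna : List (List Int) × Int := ([[1, 2], [3, 4]], 3)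

def Spec_obtem_coluna (tab : List (List Int)) (pos : Int) (out : List Int) : Prop := out = obtem_coluna_alt tab pos
instance (tab : List (List Int)) (pos : Int) (out : List Int) : Decidable (Spec_obtem_coluna tab pos out) := by unfold Spec_obtem_coluna; infer_instance

-- ===== CLAIM (what is proved, stated in full; the proofs are below) =====
def Claim_equal_obtem_coluna : Prop := ∀ (tab : List (List Int)) (pos : Int), Dom_obtem_coluna tab pos → Pre_obtem_coluna tab pos → Spec_obtem_coluna tab pos (obtem_coluna tab pos)

-- ===== LEMMAS AND PROOFS =====

-- The row loop lands on the unique linha with (linha-1)*c < pos ≤ linha*c.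
theorem pvWhileLinha_spec (c pos : Int) (hc : 1 ≤ c) :
    ∀ (fuel : Nat) (linha : Int), (linha - 1) * c < pos → pos ≤ (linha + fuel) * c →
      (pvWhileLinha c pos linha fuel - 1) * c < pos ∧ pos ≤ pvWhileLinha c pos linha fuel * c := by
  intro fuel
  induction fuel with
  | zero =>
      intro linha h1 h2
      simpa [pvWhileLinha] using ⟨h1, by simpa using h2⟩
  | succ f ih =>
      intro linha h1 h2
      by_cases h : linha * c < pos
      · have := ih (linha + 1) (by simpa using h) (by
          have : linha + 1 + (f : Int) = linha + (f + 1 : Nat) := by push_cast; ring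
          rw [this]; exact h2)
        simpa [pvWhileLinha, h] using this
      · simpa [pvWhileLinha, h] using ⟨h1, not_lt.mp h⟩

-- The column loop just counts pos - posicao steps.
theorem pvWhileCol_spec (pos : Int) :
    ∀ (fuel : Nat) (posicao coluna : Int), pos - posicao = fuel →
      pvWhileCol pos posicao coluna fuel = coluna + fuel := by
  intro fuel
  induction fuel with
  | zero =>
      intro posicao coluna h
      simp [pvWhileCol]
  | succ f ih =>
      intro posicao coluna h
      have hne : posicao ≠ pos := by omega
      have := ih (posicao + 1) (coluna + 1) (by push_cast at h ⊢; omega)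
      simp only [pvWhileCol, if_pos hne, this]
      push_cast; ring

-- ===== VERDICT (by name: the statement is the Claim_ definition above) =====
theorem obtem_coluna_spec : Claim_equal_obtem_coluna := by
  unfold Claim_equal_obtem_coluna
  intro tab pos _ hpre
  obtain ⟨htab, hrow, hpos⟩ := hpre
  unfold Spec_obtem_coluna obtem_coluna obtem_coluna_alt pvObtemCoordenadas pvObtemDimensao
  simp only
  set l : Int := (tab.length : Int) with hl
  set c : Int := ((tab.headD []).length : Int) with hc
  have hc1 : 1 ≤ c := by
    have : 0 < (tab.headD []).length := List.length_pos_of_ne_nil hrow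
    omega
  have hl1 : 1 ≤ l := by
    have : 0 < tab.length := List.length_pos_of_ne_nil htab
    omega
  -- the row found by the first loop
  set L : Int := pvWhileLinha c pos 1 pos.toNat with hL
  have hLspec : (L - 1) * c < pos ∧ pos ≤ L * c := by
    refine pvWhileLinha_spec c pos hc1 pos.toNat 1 (by simpa using hpos) ?_
    have h1 : pos ≤ 1 + (pos.toNat : Int) := by omega
    calc pos ≤ 1 + (pos.toNat : Int) := h1
      _ ≤ (1 + (pos.toNat : Int)) * c := le_mul_of_one_le_right (by omega) hc1
  -- the column found by the second loop
  have hposicao : (L - 1) * c + 1 ≤ pos := by omega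
  have hcol : pvWhileCol pos ((L - 1) * c + 1) 1 (pos - ((L - 1) * c + 1)).toNat
      = pos - (L - 1) * c := by
    rw [pvWhileCol_spec pos _ _ 1 (by omega)]
    omega
  -- B's closed-form column index equals it
  have hmod : PySem.Int.mod (pos - 1) c + 1 = pos - (L - 1) * c := by
    have hfe : (pos - 1).fmod c = (pos - 1) % c := by
      rw [Int.fmod_eq_emod]; simp [if_pos (Or.inl (by omega : (0:Int) ≤ c))]
    have hsplit : pos - 1 = (pos - 1 - (L - 1) * c) + (L - 1) * c := by ring
    have hlt : pos - 1 - (L - 1) * c < c := by nlinarith [hLspec.2]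
    have hge : 0 ≤ pos - 1 - (L - 1) * c := by omega
    have : (pos - 1) % c = pos - 1 - (L - 1) * c := by
      conv_lhs => rw [hsplit]
      rw [Int.add_mul_emod_self_right]
      exact Int.emod_eq_of_lt hge hlt
    simp [PySem.Int.mod, hfe, this]
    omega
  rw [hcol, hmod]
  set col : Int := pos - (L - 1) * c with hcoldef
  have hcolge : 1 ≤ col := by omega
  -- both sides are the same arithmetic progression
  rw [PySem.List.foldl_append_eq_flatMap, PySem.List.pyRange_one,
      PySem.List.pyRange_of_pos _ _ (by omega : (0:Int) < c)]
  have hif : col < l * c + col := by nlinarith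
  rw [if_pos hif]
  have hN : ((l * c + col - col + c - 1) / c).toNat = l.toNat := by
    have : l * c + col - col + c - 1 = (c - 1) + l * c := by ring
    rw [this, Int.add_mul_ediv_right _ _ (by omega : c ≠ 0),
        Int.ediv_eq_zero_of_lt (by omega) (by omega)]
    omega
  have hM : (l + 1 - 1).toNat = l.toNat := by omega
  rw [hN, hM]
  simp only [List.nil_append]
  rw [← List.map_eq_flatMap, List.map_map]
  refine List.map_congr_left ?_
  intro k _
  simp only [Function.comp]
  push_cast; ring
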